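-- pv_equiv track=rewrite | github.com/sinsuet/msgalaxy | core/final_summary_mass_zh.py | _ordered_metric_keys
-- ===== SOURCE A (Python) =====
-- from typing import Any, Dict, Iterable, List, Optional
--
-- KNOWN_METRIC_ORDER = [
--     "max_temp",
--     "min_clearance",
--     "cg_offset",
--     "mission_keepout_violation",
--     "power_margin",
--     "voltage_drop",
--     "safety_factor",
--     "first_modal_freq",
--     "peak_power",
--     "num_collisions",
--     "boundary_violation",
-- ]
--
-- def _ordered_metric_keys(
--     initial_metrics: Dict[str, Any],
--     best_metrics: Dict[str, Any],
--     final_metrics: Dict[str, Any],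
-- ) -> List[str]:
--     seen = set()
--     ordered: List[str] = []
--     for key in KNOWN_METRIC_ORDER:
--         if key in initial_metrics or key in best_metrics or key in final_metrics:
--             seen.add(key)
--             ordered.append(key)
--     for mapping in (initial_metrics, best_metrics, final_metrics):
--         for key in mapping.keys():
--             key_text = str(key)
--             if key_text in seen:
--                 continue
--             seen.add(key_text)
--             ordered.append(key_text)
--     return ordered
-- ===== SOURCE B (Python) =====
-- from typing import Any, Dict, List
--
-- KNOWN_METRIC_ORDER = [
--     "max_temp",
--     "min_clearance",
--     "cg_offset",
--     "mission_keepout_violation",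
--     "power_margin",
--     "voltage_drop",
--     "safety_factor",
--     "first_modal_freq",
--     "peak_power",
--     "num_collisions",
--     "boundary_violation",
-- ]
--
-- def _ordered_metric_keys(
--     initial_metrics: Dict[str, Any],
--     best_metrics: Dict[str, Any],
--     final_metrics: Dict[str, Any],
-- ) -> List[str]:
--     # Bucket sort by priority: one dedup pass drops each unseen key into its
--     # priority bucket (unknown keys share the last bucket), then concatenate.
--     priority = {k: i for i, k in enumerate(KNOWN_METRIC_ORDER)}
--     nb = len(KNOWN_METRIC_ORDER)
--     buckets: List[List[str]] = [[] for _ in range(nb + 1)]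
--     seen = set()
--     for mapping in (initial_metrics, best_metrics, final_metrics):
--         for key in mapping.keys():
--             key_text = str(key)
--             if key_text not in seen:
--                 seen.add(key_text)
--                 buckets[priority.get(key_text, nb)].append(key_text)
--     result: List[str] = []
--     for bucket in buckets:
--         result.extend(bucket)
--     return result
-- ===== Notes on version B (the rewrite author's own statement) =====
-- stated objective: alternative
-- what changed: Replaces A's two-phase scheme (a pass over KNOWN_METRIC_ORDER probing all three dicts, then a dedup pass appending leftovers) by a bucket sort: a priority index built once from KNOWN_METRIC_ORDER, a single dedup pass dropping each new key into its priority bucket (unknown keys share the last bucket), and a final concatenation of the buckets.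
import Mathlib
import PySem

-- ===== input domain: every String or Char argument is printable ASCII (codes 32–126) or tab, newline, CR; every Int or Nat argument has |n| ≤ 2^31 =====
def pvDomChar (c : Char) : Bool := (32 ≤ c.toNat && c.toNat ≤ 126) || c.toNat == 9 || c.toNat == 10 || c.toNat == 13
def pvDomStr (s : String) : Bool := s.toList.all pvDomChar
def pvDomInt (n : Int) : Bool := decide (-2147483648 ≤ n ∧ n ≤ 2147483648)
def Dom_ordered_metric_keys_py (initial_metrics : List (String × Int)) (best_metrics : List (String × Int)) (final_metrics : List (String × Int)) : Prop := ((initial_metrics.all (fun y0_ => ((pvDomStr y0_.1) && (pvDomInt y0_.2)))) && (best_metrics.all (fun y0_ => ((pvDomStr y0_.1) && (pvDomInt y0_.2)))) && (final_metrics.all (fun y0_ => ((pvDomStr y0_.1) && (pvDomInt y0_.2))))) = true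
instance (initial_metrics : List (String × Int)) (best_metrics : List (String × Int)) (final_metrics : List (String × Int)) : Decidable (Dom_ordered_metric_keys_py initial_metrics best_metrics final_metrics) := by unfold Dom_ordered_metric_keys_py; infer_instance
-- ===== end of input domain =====

-- B replaces A's probe-KNOWN-then-append-leftovers scheme by a bucket sort (priority index,
-- one dedup pass into buckets, concatenate); alternative decomposition, same exact output.


def KNOWN_METRIC_ORDER : List String :=
  ["max_temp", "min_clearance", "cg_offset", "mission_keepout_violation", "power_margin",
   "voltage_drop", "safety_factor", "first_modal_freq", "peak_power", "num_collisions",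
   "boundary_violation"]

-- ===== PORT A =====
-- dicts are assoc lists: 'key in mapping' is membership among the keys, 'mapping.keys()'
-- is the deduped key list (first occurrences, dict insertion order); str(key) on a str key
-- is the key itself.
def ordered_metric_keys_py (initial_metrics : List (String × Int)) (best_metrics : List (String × Int)) (final_metrics : List (String × Int)) : List String :=
  -- seen = set(); ordered = []
  let st1 : PySem.Set String × List String :=
    KNOWN_METRIC_ORDER.foldl
      (fun st key =>
        if key ∈ initial_metrics.map Prod.fst ∨ key ∈ best_metrics.map Prod.fst ∨
            key ∈ final_metrics.map Prod.fst then
          (PySem.Set.add st.1 key, st.2 ++ [key])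
        else st)
      (PySem.Set.empty, [])
  let st2 : PySem.Set String × List String :=
    [initial_metrics, best_metrics, final_metrics].foldl
      (fun st mapping =>
        (PySem.List.dedup (mapping.map Prod.fst)).foldl
          (fun st key =>
            let key_text := key
            if PySem.Set.contains st.1 key_text then st
            else (PySem.Set.add st.1 key_text, st.2 ++ [key_text]))
          st)
      st1
  st2.2

-- ===== PORT B =====
def ordered_metric_keys_py_alt (initial_metrics : List (String × Int)) (best_metrics : List (String × Int)) (final_metrics : List (String × Int)) : List String :=
  -- priority = {k: i for i, k in enumerate(KNOWN_METRIC_ORDER)}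
  let priority : PySem.Dict String Int :=
    (PySem.List.enumerate KNOWN_METRIC_ORDER).foldl (fun d p => d.insert p.2 (p.1 : Int)) PySem.Dict.empty
  let nb : Int := (KNOWN_METRIC_ORDER.length : Int)
  let buckets0 : List (List String) := List.replicate (nb.toNat + 1) []
  let st : PySem.Set String × List (List String) :=
    [initial_metrics, best_metrics, final_metrics].foldl
      (fun st mapping =>
        (PySem.List.dedup (mapping.map Prod.fst)).foldl
          (fun st key =>
            let key_text := key
            if PySem.Set.contains st.1 key_text then st
            else (PySem.Set.add st.1 key_text,
                  st.2.modify ((priority.getD key_text nb).toNat) (fun bl => bl ++ [key_text])))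
          st)
      (PySem.Set.empty, buckets0)
  st.2.foldl (fun result bucket => result ++ bucket) []

-- ===== PRECONDITION & SPEC =====
def Spec_ordered_metric_keys_py (initial_metrics : List (String × Int)) (best_metrics : List (String × Int)) (final_metrics : List (String × Int)) (out : List String) : Prop := out = ordered_metric_keys_py_alt initial_metrics best_metrics final_metrics
instance (initial_metrics : List (String × Int)) (best_metrics : List (String × Int)) (final_metrics : List (String × Int)) (out : List String) : Decidable (Spec_ordered_metric_keys_py initial_metrics best_metrics final_metrics out) := by unfold Spec_ordered_metric_keys_py; infer_instance

-- ===== CLAIM (what is proved, stated in full; the proofs are below) =====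
def Claim_equal_ordered_metric_keys_py : Prop := ∀ (initial_metrics : List (String × Int)) (best_metrics : List (String × Int)) (final_metrics : List (String × Int)), Dom_ordered_metric_keys_py initial_metrics best_metrics final_metrics → Spec_ordered_metric_keys_py initial_metrics best_metrics final_metrics (ordered_metric_keys_py initial_metrics best_metrics final_metrics)

-- ===== LEMMAS AND PROOFS =====

-- the keys a dedup pass starting from seen-set s appends, in order
def pvNewOf (s : List String) : List String → List String
  | [] => []
  | k :: L => if k ∈ s then pvNewOf s L else k :: pvNewOf (s ++ [k]) L

-- the priority index B builds, and the bucket number of a key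
def pvPrio : PySem.Dict String Int :=
  (PySem.List.enumerate KNOWN_METRIC_ORDER).foldl (fun d p => d.insert p.2 (p.1 : Int)) PySem.Dict.empty

def pvIdx (k : String) : Nat := (pvPrio.getD k (KNOWN_METRIC_ORDER.length : Int)).toNat

def pvAddAll (bs : List (List String)) (ks : List String) : List (List String) :=
  ks.foldl (fun bs k => bs.modify (pvIdx k) (fun bl => bl ++ [k])) bs

lemma pvNewOf_congr (s s' L) (h : ∀ x : String, x ∈ s ↔ x ∈ s') :
    pvNewOf s L = pvNewOf s' L := by
  induction L generalizing s s' with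
  | nil => rfl
  | cons k L ih =>
    simp only [pvNewOf]
    by_cases hk : k ∈ s
    · rw [if_pos hk, if_pos ((h k).1 hk)]; exact ih _ _ h
    · rw [if_neg hk, if_neg (fun hc => hk ((h k).2 hc))]
      refine congrArg _ (ih _ _ ?_)
      intro x; simp [h x]

lemma pvNewOf_mem (s L) (x : String) : x ∈ pvNewOf s L ↔ x ∈ L ∧ x ∉ s := by
  induction L generalizing s with
  | nil => simp [pvNewOf]
  | cons k L ih =>
    simp only [pvNewOf]
    by_cases hk : k ∈ s
    · rw [if_pos hk, ih]
      constructor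
      · rintro ⟨h1, h2⟩; exact ⟨List.mem_cons_of_mem _ h1, h2⟩
      · rintro ⟨h1, h2⟩
        rcases List.mem_cons.1 h1 with rfl | h1
        · exact absurd hk h2
        · exact ⟨h1, h2⟩
    · rw [if_neg hk]
      simp only [List.mem_cons, ih, List.mem_append, List.not_mem_nil, or_false]
      constructor
      · rintro (rfl | ⟨h1, h2⟩)
        · exact ⟨Or.inl rfl, hk⟩
        · exact ⟨Or.inr h1, fun hs => h2 (Or.inl hs)⟩
      · rintro ⟨rfl | h1, h2⟩
        · exact Or.inl rfl
        · by_cases hxk : x = k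
          · exact Or.inl hxk
          · exact Or.inr ⟨h1, fun hc => (hc.elim (fun a => h2 a) (fun a => hxk a))⟩

lemma pvNewOf_nodup (s L) : (pvNewOf s L).Nodup := by
  induction L generalizing s with
  | nil => exact List.nodup_nil
  | cons k L ih =>
    simp only [pvNewOf]
    by_cases hk : k ∈ s
    · rw [if_pos hk]; exact ih s
    · rw [if_neg hk]
      refine List.nodup_cons.2 ⟨fun hc => ?_, ih _⟩
      have := (pvNewOf_mem _ _ _).1 hc
      simp at this
lemma pvNewOf_append (s L1 L2) :
    pvNewOf s (L1 ++ L2) = pvNewOf s L1 ++ pvNewOf (s ++ pvNewOf s L1) L2 := by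
  induction L1 generalizing s with
  | nil => simp [pvNewOf]
  | cons k L1 ih =>
    simp only [List.cons_append, pvNewOf]
    by_cases hk : k ∈ s
    · rw [if_pos hk, if_pos hk, ih]
    · rw [if_neg hk, if_neg hk, ih]
      simp only [List.cons_append, List.append_assoc]
      rfl

lemma pvNewOf_eq_filter (s L) :
    pvNewOf s L = (pvNewOf [] L).filter (fun k => !decide (k ∈ s)) := by
  have main : ∀ (L t : List String),
      pvNewOf (s ++ t) L = (pvNewOf t L).filter (fun k => !decide (k ∈ s)) := by
    intro L
    induction L with
    | nil => intro t; simp [pvNewOf]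
    | cons k L ih =>
      intro t
      simp only [pvNewOf]
      by_cases hkt : k ∈ t
      · rw [if_pos (by simp [hkt]), if_pos hkt, ih]
      · by_cases hks : k ∈ s
        · rw [if_pos (by simp [hks]), if_neg hkt]
          simp only [List.filter_cons]
          rw [if_neg (by simp [hks])]
          rw [← ih (t ++ [k])]
          refine pvNewOf_congr _ _ _ ?_
          intro x
          simp only [List.mem_append, List.mem_singleton]
          constructor
          · tauto
          · rintro (h | h | rfl)
            · exact Or.inl h
            · exact Or.inr h
            · exact Or.inl hks
        · rw [if_neg (by simp [hks, hkt]), if_neg hkt]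
          simp only [List.filter_cons]
          rw [if_pos (by simp [hks])]
          refine congrArg _ ?_
          rw [← ih (t ++ [k])]
          refine pvNewOf_congr _ _ _ ?_
          intro x
          simp only [List.mem_append, List.mem_singleton]
          tauto
  have := main L []
  simpa using this

-- A's / B's dedup loops, characterised
lemma pvDedupFoldA (L : List String) (s : PySem.Set String) (os : List String) :
    L.foldl (fun (st : PySem.Set String × List String) key =>
        if PySem.Set.contains st.1 key then st
        else (PySem.Set.add st.1 key, st.2 ++ [key])) (s, os)
      = (s ++ pvNewOf s L, os ++ pvNewOf s L) := by
  induction L generalizing s os with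
  | nil => simp only [List.foldl_nil, pvNewOf, List.append_nil]
  | cons k L ih =>
    simp only [List.foldl_cons, pvNewOf]
    by_cases hk : k ∈ s
    · rw [if_pos hk]
      have hc : PySem.Set.contains s k = true := by simpa [PySem.Set.contains_iff] using hk
      rw [if_pos hc]
      exact ih s os
    · rw [if_neg hk]
      have hc : PySem.Set.contains s k ≠ true := by
        simpa [PySem.Set.contains_iff] using hk
      rw [if_neg hc, PySem.Set.add_of_not_mem hk]
      rw [ih (s ++ [k]) (os ++ [k])]
      simp [List.append_assoc]

lemma pvDedupFoldB (L : List String) (s : PySem.Set String) (bs : List (List String)) :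
    L.foldl (fun (st : PySem.Set String × List (List String)) key =>
        if PySem.Set.contains st.1 key then st
        else (PySem.Set.add st.1 key, st.2.modify (pvIdx key) (fun bl => bl ++ [key]))) (s, bs)
      = (s ++ pvNewOf s L, pvAddAll bs (pvNewOf s L)) := by
  induction L generalizing s bs with
  | nil => simp only [List.foldl_nil, pvNewOf, List.append_nil, pvAddAll]
  | cons k L ih =>
    simp only [List.foldl_cons, pvNewOf]
    by_cases hk : k ∈ s
    · rw [if_pos hk]
      have hc : PySem.Set.contains s k = true := by simpa [PySem.Set.contains_iff] using hk
      rw [if_pos hc]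
      exact ih s bs
    · rw [if_neg hk]
      have hc : PySem.Set.contains s k ≠ true := by
        simpa [PySem.Set.contains_iff] using hk
      rw [if_neg hc, PySem.Set.add_of_not_mem hk]
      rw [ih (s ++ [k]) (bs.modify (pvIdx k) (fun bl => bl ++ [k]))]
      simp [pvAddAll, List.append_assoc]

lemma pvAddAll_length (bs ks) : (pvAddAll bs ks).length = bs.length := by
  induction ks generalizing bs with
  | nil => rfl
  | cons k ks ih => simp [pvAddAll, List.foldl_cons] at ih ⊢; rw [ih]; simp

lemma pvAddAll_getElem? (bs ks) (j : Nat) (hj : j < bs.length) :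
    (pvAddAll bs ks)[j]? = some (bs[j] ++ ks.filter (fun k => decide (pvIdx k = j))) := by
  induction ks generalizing bs with
  | nil => simp [pvAddAll, List.getElem?_eq_getElem hj]
  | cons k ks ih =>
    have hlen : j < (bs.modify (pvIdx k) (fun bl => bl ++ [k])).length := by
      simpa using hj
    have hstep : pvAddAll bs (k :: ks)
        = pvAddAll (bs.modify (pvIdx k) (fun bl => bl ++ [k])) ks := rfl
    rw [hstep, ih _ hlen, List.filter_cons]
    congr 1
    rw [List.getElem_modify]
    by_cases hji : pvIdx k = j
    · rw [if_pos hji, if_pos (by simp [hji])]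
      simp
    · rw [if_neg hji, if_neg (by simp [hji])]

set_option maxHeartbeats 1000000 in
lemma pvIdx_eq (k : String) :
    pvIdx k =
      if k = "max_temp" then 0 else if k = "min_clearance" then 1
      else if k = "cg_offset" then 2 else if k = "mission_keepout_violation" then 3
      else if k = "power_margin" then 4 else if k = "voltage_drop" then 5
      else if k = "safety_factor" then 6 else if k = "first_modal_freq" then 7
      else if k = "peak_power" then 8 else if k = "num_collisions" then 9
      else if k = "boundary_violation" then 10 else 11 := by
  have : pvPrio = PySem.Dict.mk
      [("max_temp", 0), ("min_clearance", 1), ("cg_offset", 2), ("mission_keepout_violation", 3),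
       ("power_margin", 4), ("voltage_drop", 5), ("safety_factor", 6), ("first_modal_freq", 7),
       ("peak_power", 8), ("num_collisions", 9), ("boundary_violation", 10)] := by decide
  rw [pvIdx, this]
  by_cases h1 : k = "max_temp"
  · subst h1; decide
  by_cases h2 : k = "min_clearance"
  · subst h2; decide
  by_cases h3 : k = "cg_offset"
  · subst h3; decide
  by_cases h4 : k = "mission_keepout_violation"
  · subst h4; decide
  by_cases h5 : k = "power_margin"
  · subst h5; decide
  by_cases h6 : k = "voltage_drop"
  · subst h6; decide
  by_cases h7 : k = "safety_factor"
  · subst h7; decide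
  by_cases h8 : k = "first_modal_freq"
  · subst h8; decide
  by_cases h9 : k = "peak_power"
  · subst h9; decide
  by_cases h10 : k = "num_collisions"
  · subst h10; decide
  by_cases h11 : k = "boundary_violation"
  · subst h11; decide
  have f1 : ("max_temp" == k) = false := beq_eq_false_iff_ne.mpr (Ne.symm h1)
  have f2 : ("min_clearance" == k) = false := beq_eq_false_iff_ne.mpr (Ne.symm h2)
  have f3 : ("cg_offset" == k) = false := beq_eq_false_iff_ne.mpr (Ne.symm h3)
  have f4 : ("mission_keepout_violation" == k) = false := beq_eq_false_iff_ne.mpr (Ne.symm h4)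
  have f5 : ("power_margin" == k) = false := beq_eq_false_iff_ne.mpr (Ne.symm h5)
  have f6 : ("voltage_drop" == k) = false := beq_eq_false_iff_ne.mpr (Ne.symm h6)
  have f7 : ("safety_factor" == k) = false := beq_eq_false_iff_ne.mpr (Ne.symm h7)
  have f8 : ("first_modal_freq" == k) = false := beq_eq_false_iff_ne.mpr (Ne.symm h8)
  have f9 : ("peak_power" == k) = false := beq_eq_false_iff_ne.mpr (Ne.symm h9)
  have f10 : ("num_collisions" == k) = false := beq_eq_false_iff_ne.mpr (Ne.symm h10)
  have f11 : ("boundary_violation" == k) = false := beq_eq_false_iff_ne.mpr (Ne.symm h11)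
  simp [PySem.Dict.getD_eq_get?_getD, KNOWN_METRIC_ORDER, f1, f2, f3, f4, f5, f6, f7, f8, f9, f10, f11, h1, h2, h3, h4, h5, h6, h7, h8, h9, h10, h11, PySem.Dict.get?]

lemma pvFilter_eq_single (N : List String) (hN : N.Nodup) (a : String) :
    N.filter (fun k => decide (k = a)) = if a ∈ N then [a] else [] := by
  induction N with
  | nil => simp
  | cons x N ih =>
    rcases List.nodup_cons.1 hN with ⟨hx, hN'⟩
    simp only [List.filter_cons, List.mem_cons]
    by_cases hxa : x = a
    · subst hxa
      rw [if_pos (by simp), ih hN', if_neg hx]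
      simp
    · rw [if_neg (by simp [hxa]), ih hN']
      by_cases ha : a ∈ N
      · simp [ha]
      · rw [if_neg ha, if_neg (by rintro (rfl | h); exacts [hxa rfl, ha h])]

lemma pvConcat_if (ks N : List String) :
    (ks.map (fun k => if k ∈ N then [k] else [])).flatten
      = ks.filter (fun k => decide (k ∈ N)) := by
  induction ks with
  | nil => rfl
  | cons k ks ih =>
    simp only [List.map_cons, List.flatten_cons, List.filter_cons, ih]
    by_cases hk : k ∈ N
    · simp [hk]
    · simp [hk]

-- A's first phase, characterised
lemma pvPhase1 (ks : List String) (p : String → Prop) [DecidablePred p]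
    (s : PySem.Set String) (os : List String) :
    ks.foldl (fun (st : PySem.Set String × List String) key =>
        if p key then (PySem.Set.add st.1 key, st.2 ++ [key]) else st) (s, os)
      = ((ks.filter (fun k => decide (p k))).foldl PySem.Set.add s,
         os ++ ks.filter (fun k => decide (p k))) := by
  induction ks generalizing s os with
  | nil => simp
  | cons k ks ih =>
    simp only [List.foldl_cons, List.filter_cons]
    by_cases hk : p k
    · rw [if_pos hk, if_pos (by simpa using hk), ih]
      simp
    · rw [if_neg hk, if_neg (by simpa using hk), ih]

lemma pvIdx0 (k : String) : decide (pvIdx k = 0) = decide (k = "max_temp") := by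
  rw [pvIdx_eq]; split_ifs <;> simp_all

lemma pvIdx1 (k : String) : decide (pvIdx k = 1) = decide (k = "min_clearance") := by
  rw [pvIdx_eq]; split_ifs <;> simp_all

lemma pvIdx2 (k : String) : decide (pvIdx k = 2) = decide (k = "cg_offset") := by
  rw [pvIdx_eq]; split_ifs <;> simp_all

lemma pvIdx3 (k : String) : decide (pvIdx k = 3) = decide (k = "mission_keepout_violation") := by
  rw [pvIdx_eq]; split_ifs <;> simp_all

lemma pvIdx4 (k : String) : decide (pvIdx k = 4) = decide (k = "power_margin") := by
  rw [pvIdx_eq]; split_ifs <;> simp_all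

lemma pvIdx5 (k : String) : decide (pvIdx k = 5) = decide (k = "voltage_drop") := by
  rw [pvIdx_eq]; split_ifs <;> simp_all

lemma pvIdx6 (k : String) : decide (pvIdx k = 6) = decide (k = "safety_factor") := by
  rw [pvIdx_eq]; split_ifs <;> simp_all

lemma pvIdx7 (k : String) : decide (pvIdx k = 7) = decide (k = "first_modal_freq") := by
  rw [pvIdx_eq]; split_ifs <;> simp_all

lemma pvIdx8 (k : String) : decide (pvIdx k = 8) = decide (k = "peak_power") := by
  rw [pvIdx_eq]; split_ifs <;> simp_all

lemma pvIdx9 (k : String) : decide (pvIdx k = 9) = decide (k = "num_collisions") := by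
  rw [pvIdx_eq]; split_ifs <;> simp_all

lemma pvIdx10 (k : String) : decide (pvIdx k = 10) = decide (k = "boundary_violation") := by
  rw [pvIdx_eq]; split_ifs <;> simp_all

lemma pvIdx11 (k : String) : decide (pvIdx k = 11) = !decide (k ∈ KNOWN_METRIC_ORDER) := by
  rw [pvIdx_eq]; split_ifs <;> simp_all [KNOWN_METRIC_ORDER]

lemma pvBuckets_eq (N : List String) (hN : N.Nodup) :
    pvAddAll (List.replicate 12 []) N =
      [(if "max_temp" ∈ N then ["max_temp"] else []),
       (if "min_clearance" ∈ N then ["min_clearance"] else []),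
       (if "cg_offset" ∈ N then ["cg_offset"] else []),
       (if "mission_keepout_violation" ∈ N then ["mission_keepout_violation"] else []),
       (if "power_margin" ∈ N then ["power_margin"] else []),
       (if "voltage_drop" ∈ N then ["voltage_drop"] else []),
       (if "safety_factor" ∈ N then ["safety_factor"] else []),
       (if "first_modal_freq" ∈ N then ["first_modal_freq"] else []),
       (if "peak_power" ∈ N then ["peak_power"] else []),
       (if "num_collisions" ∈ N then ["num_collisions"] else []),
       (if "boundary_violation" ∈ N then ["boundary_violation"] else []),
       N.filter (fun k => !decide (k ∈ KNOWN_METRIC_ORDER))] := by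
  apply List.ext_getElem?
  intro i
  by_cases hi : i < 12
  · interval_cases i
    · rw [pvAddAll_getElem? _ _ 0 (by simp)]
      simp only [List.getElem_replicate, List.nil_append]
      rw [show (fun k => decide (pvIdx k = 0)) = (fun k => decide (k = "max_temp")) from funext pvIdx0,
        pvFilter_eq_single N hN]
      rfl
    · rw [pvAddAll_getElem? _ _ 1 (by simp)]
      simp only [List.getElem_replicate, List.nil_append]
      rw [show (fun k => decide (pvIdx k = 1)) = (fun k => decide (k = "min_clearance")) from funext pvIdx1,
        pvFilter_eq_single N hN]
      rfl
    · rw [pvAddAll_getElem? _ _ 2 (by simp)]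
      simp only [List.getElem_replicate, List.nil_append]
      rw [show (fun k => decide (pvIdx k = 2)) = (fun k => decide (k = "cg_offset")) from funext pvIdx2,
        pvFilter_eq_single N hN]
      rfl
    · rw [pvAddAll_getElem? _ _ 3 (by simp)]
      simp only [List.getElem_replicate, List.nil_append]
      rw [show (fun k => decide (pvIdx k = 3)) = (fun k => decide (k = "mission_keepout_violation")) from funext pvIdx3,
        pvFilter_eq_single N hN]
      rfl
    · rw [pvAddAll_getElem? _ _ 4 (by simp)]
      simp only [List.getElem_replicate, List.nil_append]
      rw [show (fun k => decide (pvIdx k = 4)) = (fun k => decide (k = "power_margin")) from funext pvIdx4,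
        pvFilter_eq_single N hN]
      rfl
    · rw [pvAddAll_getElem? _ _ 5 (by simp)]
      simp only [List.getElem_replicate, List.nil_append]
      rw [show (fun k => decide (pvIdx k = 5)) = (fun k => decide (k = "voltage_drop")) from funext pvIdx5,
        pvFilter_eq_single N hN]
      rfl
    · rw [pvAddAll_getElem? _ _ 6 (by simp)]
      simp only [List.getElem_replicate, List.nil_append]
      rw [show (fun k => decide (pvIdx k = 6)) = (fun k => decide (k = "safety_factor")) from funext pvIdx6,
        pvFilter_eq_single N hN]
      rfl
    · rw [pvAddAll_getElem? _ _ 7 (by simp)]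
      simp only [List.getElem_replicate, List.nil_append]
      rw [show (fun k => decide (pvIdx k = 7)) = (fun k => decide (k = "first_modal_freq")) from funext pvIdx7,
        pvFilter_eq_single N hN]
      rfl
    · rw [pvAddAll_getElem? _ _ 8 (by simp)]
      simp only [List.getElem_replicate, List.nil_append]
      rw [show (fun k => decide (pvIdx k = 8)) = (fun k => decide (k = "peak_power")) from funext pvIdx8,
        pvFilter_eq_single N hN]
      rfl
    · rw [pvAddAll_getElem? _ _ 9 (by simp)]
      simp only [List.getElem_replicate, List.nil_append]
      rw [show (fun k => decide (pvIdx k = 9)) = (fun k => decide (k = "num_collisions")) from funext pvIdx9,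
        pvFilter_eq_single N hN]
      rfl
    · rw [pvAddAll_getElem? _ _ 10 (by simp)]
      simp only [List.getElem_replicate, List.nil_append]
      rw [show (fun k => decide (pvIdx k = 10)) = (fun k => decide (k = "boundary_violation")) from funext pvIdx10,
        pvFilter_eq_single N hN]
      rfl
    · rw [pvAddAll_getElem? _ _ 11 (by simp)]
      simp only [List.getElem_replicate, List.nil_append]
      rw [show (fun k => decide (pvIdx k = 11)) = (fun k => !decide (k ∈ KNOWN_METRIC_ORDER)) from funext pvIdx11]
      rfl
  · have h1 : (pvAddAll (List.replicate 12 ([] : List String)) N).length ≤ i := by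
      rw [pvAddAll_length]; simpa using Nat.le_of_not_lt hi
    rw [List.getElem?_eq_none h1, List.getElem?_eq_none (by simpa using Nat.le_of_not_lt hi)]

lemma pvAddAll_append (bs : List (List String)) (x y : List String) :
    pvAddAll (pvAddAll bs x) y = pvAddAll bs (x ++ y) := by
  simp [pvAddAll, List.foldl_append]

-- ===== VERDICT (by name: the statement is the Claim_ definition above) =====
-- (the helper lemmas above feed this proof)
lemma pvMem_foldl_add (l : List String) (s : PySem.Set String) (x : String) :
    x ∈ l.foldl PySem.Set.add s ↔ x ∈ s ∨ x ∈ l := by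
  induction l generalizing s with
  | nil => simp
  | cons k l ih =>
    simp only [List.foldl_cons, ih, PySem.Set.mem_add, List.mem_cons]
    tauto

lemma pvA_eq (im bm fm : List (String × Int)) :
    ordered_metric_keys_py im bm fm =
      KNOWN_METRIC_ORDER.filter
          (fun k => decide (k ∈ im.map Prod.fst ∨ k ∈ bm.map Prod.fst ∨ k ∈ fm.map Prod.fst))
        ++ pvNewOf
            (KNOWN_METRIC_ORDER.filter
              (fun k => decide (k ∈ im.map Prod.fst ∨ k ∈ bm.map Prod.fst ∨ k ∈ fm.map Prod.fst)))
            (PySem.List.dedup (im.map Prod.fst) ++ PySem.List.dedup (bm.map Prod.fst)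
              ++ PySem.List.dedup (fm.map Prod.fst)) := by
  unfold ordered_metric_keys_py
  dsimp only
  rw [pvPhase1]
  simp only [List.foldl_cons, List.foldl_nil]
  rw [pvDedupFoldA, pvDedupFoldA, pvDedupFoldA]
  dsimp only
  rw [List.nil_append]
  set P := KNOWN_METRIC_ORDER.filter
      (fun k => decide (k ∈ im.map Prod.fst ∨ k ∈ bm.map Prod.fst ∨ k ∈ fm.map Prod.fst)) with hP
  set s0 := List.foldl PySem.Set.add PySem.Set.empty P with hs0
  have hmem : ∀ x : String, x ∈ s0 ↔ x ∈ P := by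
    intro x
    rw [hs0, pvMem_foldl_add]
    simp [PySem.Set.empty]
  rw [pvNewOf_append, pvNewOf_append]
  rw [pvNewOf_congr s0 P _ hmem]
  rw [pvNewOf_congr (s0 ++ pvNewOf P (PySem.List.dedup (im.map Prod.fst)))
      (P ++ pvNewOf P (PySem.List.dedup (im.map Prod.fst))) _
      (by intro x; simp only [List.mem_append, hmem])]
  rw [pvNewOf_congr
      (s0 ++ pvNewOf P (PySem.List.dedup (im.map Prod.fst))
        ++ pvNewOf (P ++ pvNewOf P (PySem.List.dedup (im.map Prod.fst)))
            (PySem.List.dedup (bm.map Prod.fst)))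
      (P ++ pvNewOf P (PySem.List.dedup (im.map Prod.fst))
        ++ pvNewOf (P ++ pvNewOf P (PySem.List.dedup (im.map Prod.fst)))
            (PySem.List.dedup (bm.map Prod.fst))) _
      (by intro x; simp only [List.mem_append, hmem])]
  simp [List.append_assoc]

lemma pvNewOf_append_nil (L1 L2 : List String) :
    pvNewOf [] (L1 ++ L2) = pvNewOf [] L1 ++ pvNewOf (pvNewOf [] L1) L2 := by
  rw [pvNewOf_append, List.nil_append]

lemma pvB_eq (im bm fm : List (String × Int)) :
    ordered_metric_keys_py_alt im bm fm =
      (pvAddAll (List.replicate 12 [])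
        (pvNewOf []
          (PySem.List.dedup (im.map Prod.fst) ++ PySem.List.dedup (bm.map Prod.fst)
            ++ PySem.List.dedup (fm.map Prod.fst)))).flatten := by
  unfold ordered_metric_keys_py_alt
  dsimp only
  rw [show ((PySem.List.enumerate KNOWN_METRIC_ORDER).foldl
        (fun d p => d.insert p.2 (p.1 : Int)) PySem.Dict.empty) = pvPrio from rfl]
  rw [show (fun (st : PySem.Set String × List (List String)) (key : String) =>
        if PySem.Set.contains st.1 key then st
        else (PySem.Set.add st.1 key,
              st.2.modify ((pvPrio.getD key ((KNOWN_METRIC_ORDER.length : Nat) : Int)).toNat)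
                (fun bl => bl ++ [key])))
      = (fun (st : PySem.Set String × List (List String)) (key : String) =>
        if PySem.Set.contains st.1 key then st
        else (PySem.Set.add st.1 key, st.2.modify (pvIdx key) (fun bl => bl ++ [key])))
      from rfl]
  rw [show (List.replicate (((KNOWN_METRIC_ORDER.length : Nat) : Int).toNat + 1) ([] : List String))
      = List.replicate 12 [] from rfl]
  simp only [List.foldl_cons, List.foldl_nil]
  rw [pvDedupFoldB, pvDedupFoldB, pvDedupFoldB]
  dsimp only
  rw [show (PySem.Set.empty : PySem.Set String) = ([] : List String) from rfl]
  simp only [List.nil_append]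
  rw [pvAddAll_append, pvAddAll_append]
  rw [pvNewOf_append_nil
        (PySem.List.dedup (im.map Prod.fst) ++ PySem.List.dedup (bm.map Prod.fst))
        (PySem.List.dedup (fm.map Prod.fst)),
      pvNewOf_append_nil (PySem.List.dedup (im.map Prod.fst)) (PySem.List.dedup (bm.map Prod.fst))]
  rw [PySem.List.foldl_append_eq_flatten, List.nil_append]
  simp [List.append_assoc]

theorem ordered_metric_keys_py_spec : Claim_equal_ordered_metric_keys_py := by
  intro im bm fm _
  show ordered_metric_keys_py im bm fm = ordered_metric_keys_py_alt im bm fm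
  rw [pvA_eq, pvB_eq, pvBuckets_eq _ (pvNewOf_nodup _ _)]
  set N := pvNewOf []
      (PySem.List.dedup (im.map Prod.fst) ++ PySem.List.dedup (bm.map Prod.fst)
        ++ PySem.List.dedup (fm.map Prod.fst)) with hN
  have hPN : ∀ k : String,
      (k ∈ im.map Prod.fst ∨ k ∈ bm.map Prod.fst ∨ k ∈ fm.map Prod.fst) ↔ k ∈ N := by
    intro k
    rw [hN, pvNewOf_mem]
    simp
  have hP2 : KNOWN_METRIC_ORDER.filter
        (fun k => decide (k ∈ im.map Prod.fst ∨ k ∈ bm.map Prod.fst ∨ k ∈ fm.map Prod.fst))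
      = KNOWN_METRIC_ORDER.filter (fun k => decide (k ∈ N)) := by
    refine List.filter_congr ?_
    intro k _
    simp only [decide_eq_decide]
    exact hPN k
  have hTail : pvNewOf
        (KNOWN_METRIC_ORDER.filter
          (fun k => decide (k ∈ im.map Prod.fst ∨ k ∈ bm.map Prod.fst ∨ k ∈ fm.map Prod.fst)))
        (PySem.List.dedup (im.map Prod.fst) ++ PySem.List.dedup (bm.map Prod.fst)
          ++ PySem.List.dedup (fm.map Prod.fst))
      = N.filter (fun k => !decide (k ∈ KNOWN_METRIC_ORDER)) := by
    rw [pvNewOf_eq_filter, ← hN]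
    refine List.filter_congr ?_
    intro x hx
    have hpres := (hPN x).2 hx
    simp only [List.mem_filter, decide_eq_true_eq, Bool.not_inj_iff, decide_eq_decide]
    constructor
    · exact fun h1 => h1.1
    · exact fun h1 => ⟨h1, hpres⟩
  rw [hTail, hP2, ← pvConcat_if KNOWN_METRIC_ORDER N]
  simp [KNOWN_METRIC_ORDER, List.append_assoc]
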